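-- pv_equiv track=rewrite | github.com/elenad00/advent_of_code | 2022/week_three/d15/d15_p1.py | check
-- ===== SOURCE A (Python) =====
-- def check(sx, sy, row, x, y, td, t):
--   ir = []
--   if sy==row: ir.append((x,sy))
--   if y==row: ir.append((sx, y))
--
--   for c in range(td-t):
--     f_y = y+c
--     if f_y == row: ir.append((sx,f_y))
--     f_y = y-c
--     if f_y == row:ir.append((sx,f_y))
--
--   return ir
-- ===== SOURCE B (Python) =====
-- def check(sx, sy, row, x, y, td, t):
--     c = row - y
--     n = td - t
--     head = [(x, sy)] * (sy == row) + [(sx, y)] * (y == row)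
--     hits = (0 <= c < n) + (0 <= -c < n)
--     return head + [(sx, row)] * hits
-- ===== Notes on version B (the rewrite author's own statement) =====
-- stated objective: faster
-- what changed: Replaces the O(td-t) offset scan and conditional appends by a closed form: the loop's whole contribution is the pair (sx,row) replicated hits times, where hits counts which of the two offsets row-y and y-row lies in [0, td-t); the result is one declarative concatenation of list-repetitions.
import Mathlib
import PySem

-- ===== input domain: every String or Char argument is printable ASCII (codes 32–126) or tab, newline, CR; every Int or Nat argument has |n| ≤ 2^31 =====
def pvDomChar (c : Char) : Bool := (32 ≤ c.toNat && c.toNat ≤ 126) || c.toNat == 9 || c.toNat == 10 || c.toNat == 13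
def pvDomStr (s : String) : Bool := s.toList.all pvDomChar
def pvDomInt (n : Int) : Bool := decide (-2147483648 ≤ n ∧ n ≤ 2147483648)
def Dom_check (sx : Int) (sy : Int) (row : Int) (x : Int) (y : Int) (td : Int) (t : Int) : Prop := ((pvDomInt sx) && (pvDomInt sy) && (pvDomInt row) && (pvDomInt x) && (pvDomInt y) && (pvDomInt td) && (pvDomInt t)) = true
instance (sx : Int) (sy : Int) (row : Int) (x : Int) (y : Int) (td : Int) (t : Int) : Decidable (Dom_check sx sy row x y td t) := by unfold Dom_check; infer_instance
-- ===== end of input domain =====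

-- B replaces the offset scan by a closed-form replicate count (faster, asymptotic).


-- ===== PORT A =====
def check (sx : Int) (sy : Int) (row : Int) (x : Int) (y : Int) (td : Int) (t : Int) : List (Int × Int) :=
  let ir : List (Int × Int) := []
  let ir := if sy == row then ir ++ [(x, sy)] else ir
  let ir := if y == row then ir ++ [(sx, y)] else ir
  (PySem.List.pyRange 0 (td - t) 1).foldl (fun acc c =>
    let acc := if y + c == row then acc ++ [(sx, y + c)] else acc
    if y - c == row then acc ++ [(sx, y - c)] else acc) ir

-- ===== PORT B =====
-- Source B: declarative concatenation of list-repetitions; bool→count via Lean's if-then-else 1/0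
def check_alt (sx : Int) (sy : Int) (row : Int) (x : Int) (y : Int) (td : Int) (t : Int) : List (Int × Int) :=
  let c := row - y
  let n := td - t
  let head :=
    List.replicate (if sy = row then 1 else 0) (x, sy) ++
    List.replicate (if y = row then 1 else 0) (sx, y)
  let hits := (if 0 ≤ c ∧ c < n then 1 else 0) + (if 0 ≤ -c ∧ -c < n then 1 else 0)
  head ++ List.replicate hits (sx, row)

-- ===== PRECONDITION & SPEC =====
def Spec_check (sx : Int) (sy : Int) (row : Int) (x : Int) (y : Int) (td : Int) (t : Int) (out : List (Int × Int)) : Prop := out = check_alt sx sy row x y td t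
instance (sx : Int) (sy : Int) (row : Int) (x : Int) (y : Int) (td : Int) (t : Int) (out : List (Int × Int)) : Decidable (Spec_check sx sy row x y td t out) := by unfold Spec_check; infer_instance

-- ===== CLAIM =====
def Claim_equal_check : Prop := ∀ (sx : Int) (sy : Int) (row : Int) (x : Int) (y : Int) (td : Int) (t : Int), Dom_check sx sy row x y td t → Spec_check sx sy row x y td t (check sx sy row x y td t)

-- ===== LEMMAS AND PROOFS =====

-- closed form of the loop's contribution when the loop runs over offsets a..n-1
def loopTail (sx row y a n : Int) : List (Int × Int) :=
  (if a ≤ row - y ∧ row - y < n then [(sx, row)] else []) ++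
  (if a ≤ y - row ∧ y - row < n then [(sx, row)] else [])

lemma loop_closed (sx row y n : Int) :
    ∀ (k : Nat) (a : Int), 0 ≤ a → n - a ≤ (k : Int) →
    ∀ init : List (Int × Int),
    (PySem.List.pyRange a n 1).foldl (fun acc c =>
      let acc := if y + c == row then acc ++ [(sx, y + c)] else acc
      if y - c == row then acc ++ [(sx, y - c)] else acc) init
    = init ++ loopTail sx row y a n := by
  intro k
  induction k with
  | zero =>
    intro a ha hk init
    rw [PySem.List.pyRange_one_eq_nil (by omega)]
    simp [loopTail]
    constructor <;> (intro h; omega)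
  | succ k ih =>
    intro a ha hk init
    by_cases hab : n ≤ a
    · rw [PySem.List.pyRange_one_eq_nil hab]
      simp [loopTail]
      constructor <;> (intro h; omega)
    · rw [PySem.List.pyRange_one_cons (by omega)]
      simp only [List.foldl_cons]
      rw [ih (a + 1) (by omega) (by omega)]
      simp only [loopTail, beq_iff_eq]
      by_cases h1 : y + a = row <;> by_cases h2 : y - a = row <;>
        simp only [h1, h2, if_pos, if_neg, not_false_iff] <;>
        split_ifs <;> (try omega) <;> simp [List.append_assoc]

theorem check_spec : Claim_equal_check := by
  intro sx sy row x y td t _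
  unfold Spec_check check check_alt
  rw [loop_closed sx row y (td - t) (td - t).toNat 0 (by omega) (by omega)]
  simp only [loopTail, beq_iff_eq, neg_sub]
  split_ifs <;> simp_all [List.replicate]
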